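-- pv_equiv track=rewrite | github.com/samer25/Python-Exercise | coderbyte/Binary Reversal/BinaryReversal.py | BinaryReversal
-- ===== SOURCE A (Python) =====
-- def BinaryReversal(strParam):
--     nums = int(strParam)
--
--     input_bin = '{0:b}'.format(nums)
--
--     while len(input_bin) % 8 != 0:
--         input_bin = "0" + input_bin
--
--     rev = input_bin[::-1]
--
--     result = int(rev, 2)
--     # code goes here
--     return result
-- ===== SOURCE B (Python) =====
-- def BinaryReversal(strParam):
--     nums = int(strParam)
--     L = (max(nums.bit_length(), 1) + 7) // 8 * 8
--     result = 0
--     for _ in range(L):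
--         result = result * 2 + nums % 2
--         nums //= 2
--     return result
-- ===== Notes on version B (the rewrite author's own statement) =====
-- stated objective: alternative
-- what changed: Replaces the string pipeline (binary format, zero-padding while-loop, slice reversal, base-2 re-parse) with pure integer arithmetic: compute the padded width from bit_length and reverse the bits by popping the low bit into an accumulator.
import Mathlib
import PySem

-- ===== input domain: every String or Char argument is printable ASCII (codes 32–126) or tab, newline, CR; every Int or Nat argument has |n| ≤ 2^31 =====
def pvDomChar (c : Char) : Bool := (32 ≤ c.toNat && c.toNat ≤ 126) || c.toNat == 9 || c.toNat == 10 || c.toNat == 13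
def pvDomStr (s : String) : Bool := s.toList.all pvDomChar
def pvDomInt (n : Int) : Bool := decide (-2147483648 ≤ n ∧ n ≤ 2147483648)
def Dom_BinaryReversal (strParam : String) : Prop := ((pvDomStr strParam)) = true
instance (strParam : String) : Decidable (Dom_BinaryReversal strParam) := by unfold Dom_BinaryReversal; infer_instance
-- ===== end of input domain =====

-- B replaces A's string pipeline (format, pad loop, slice-reverse, base-2 re-parse) by an arithmetic
-- bit-popping loop over the same padded width; equivalence proved for all nonnegative parses.

-- ===== PORT A =====
-- '{0:b}'.format digits of n, MSB first ([] for n = 0)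
def pvGoA (n : Nat) : List Char :=
  if h : n = 0 then [] else pvGoA (n / 2) ++ [if n % 2 = 1 then '1' else '0']
decreasing_by exact Nat.div_lt_self (Nat.pos_of_ne_zero h) one_lt_two

-- '{0:b}'.format(nums)
def pvFormatB (nums : Int) : List Char :=
  if nums < 0 then '-' :: pvGoA nums.natAbs
  else if nums = 0 then ['0'] else pvGoA nums.natAbs

-- while len(input_bin) % 8 != 0: input_bin = "0" + input_bin
def pvPad (cs : List Char) : List Char :=
  if cs.length % 8 ≠ 0 then pvPad ('0' :: cs) else cs
termination_by (8 - cs.length % 8) % 8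
decreasing_by simp only [List.length_cons]; omega

-- int(rev, 2); exact on the reached inputs, which are built from '0'/'1' only (a '-' would make
-- Python raise ValueError: such inputs are excluded by Pre_)
def pvParse2 (cs : List Char) : Nat :=
  cs.foldl (fun a c => a * 2 + (if c = '1' then 1 else 0)) 0

def BinaryReversal (strParam : String) : Int :=
  match PySem.Int.ofStr? strParam with
  | none => 0   -- int(strParam) raises ValueError: excluded by Pre_
  | some nums => ((pvParse2 ((pvPad (pvFormatB nums)).reverse) : Nat) : Int)

-- ===== PORT B =====
-- one loop iteration: result = result * 2 + nums % 2; nums //= 2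
def pvStep (s : Int × Int) : Int × Int :=
  (s.1 * 2 + PySem.Int.mod s.2 2, PySem.Int.floordiv s.2 2)

def BinaryReversal_alt (strParam : String) : Int :=
  match PySem.Int.ofStr? strParam with
  | none => 0   -- int(strParam) raises ValueError: excluded by Pre_
  | some nums =>
    -- L = (max(nums.bit_length(), 1) + 7) // 8 * 8, inlined into the range bound
    ((PySem.List.pyRange 0 (((max (PySem.Int.bitLength nums) 1 + 7) / 8 * 8 : Nat) : Int) 1).foldl
      (fun s _ => pvStep s) ((0 : Int), nums)).1

-- ===== PRECONDITION & SPEC =====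
-- Pre_ excludes exactly the inputs where A raises ValueError: strings int() cannot parse, and
-- strings parsing to a negative number (the reversed padded string then has '-' mid-token).
def Pre_BinaryReversal (strParam : String) : Prop :=
  (PySem.Int.ofStr? strParam).isSome = true ∧ 0 ≤ (PySem.Int.ofStr? strParam).getD 0
instance (strParam : String) : Decidable (Pre_BinaryReversal strParam) := by
  unfold Pre_BinaryReversal; infer_instance
def pvWitness_BinaryReversal : String := "19"

def Spec_BinaryReversal (strParam : String) (out : Int) : Prop := out = BinaryReversal_alt strParam
instance (strParam : String) (out : Int) : Decidable (Spec_BinaryReversal strParam out) := by unfold Spec_BinaryReversal; infer_instance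

-- ===== CLAIM (what is proved, stated in full; the proofs are below) =====
def Claim_equal_BinaryReversal : Prop := ∀ (strParam : String), Dom_BinaryReversal strParam → Pre_BinaryReversal strParam → Spec_BinaryReversal strParam (BinaryReversal strParam)

-- ===== LEMMAS AND PROOFS =====

-- value of the reversal of the low k bits of n: Σ_{i<k} bit_i(n) · 2^(k-1-i)
def revLow : Nat → Nat → Nat
  | 0, _ => 0
  | k+1, n => n % 2 * 2 ^ k + revLow k (n / 2)

theorem revLow_zero_arg : ∀ k, revLow k 0 = 0 := by
  intro k; induction k with
  | zero => rfl
  | succ k ih => simp [revLow, ih]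

theorem revLow_ext (len : Nat) : ∀ k n, n < 2 ^ len → revLow (len + k) n = revLow len n * 2 ^ k := by
  induction len with
  | zero =>
    intro k n hn
    interval_cases n
    simp [revLow, revLow_zero_arg]
  | succ len ih =>
    intro k n hn
    have h2 : n / 2 < 2 ^ len := by
      have := Nat.pow_succ 2 len ▸ hn; omega
    have : len + 1 + k = (len + k) + 1 := by omega
    rw [this, revLow, revLow, ih k (n / 2) h2]
    ring

theorem pvGoA_zero : pvGoA 0 = [] := by rw [pvGoA]; simp

theorem pvGoA_pos {n : Nat} (h : n ≠ 0) :
    pvGoA n = pvGoA (n / 2) ++ [if n % 2 = 1 then '1' else '0'] := by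
  rw [pvGoA]; simp [h]

theorem pvGoA_lt (n : Nat) : n < 2 ^ (pvGoA n).length := by
  induction n using Nat.strong_induction_on with
  | _ n ih =>
    by_cases h : n = 0
    · simp [h, pvGoA_zero]
    · rw [pvGoA_pos h]
      have := ih (n / 2) (Nat.div_lt_self (Nat.pos_of_ne_zero h) one_lt_two)
      simp only [List.length_append, List.length_singleton, Nat.pow_succ]
      omega

theorem pvGoA_len (n : Nat) : (pvGoA n).length = PySem.Int.bitLength (n : Int) := by
  induction n using Nat.strong_induction_on with
  | _ n ih =>
    by_cases h : n = 0
    · simp [h, pvGoA_zero]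
    · rw [pvGoA_pos h, PySem.Int.bitLength_natCast (Nat.pos_of_ne_zero h)]
      have := ih (n / 2) (Nat.div_lt_self (Nat.pos_of_ne_zero h) one_lt_two)
      simp [this]

-- parsing the reversed digit list of n, starting from accumulator a
theorem parse_rev_go (n : Nat) : ∀ a : Nat,
    (pvGoA n).reverse.foldl (fun a c => a * 2 + (if c = '1' then 1 else 0)) a
      = revLow (pvGoA n).length n + a * 2 ^ (pvGoA n).length := by
  induction n using Nat.strong_induction_on with
  | _ n ih =>
    intro a
    by_cases h : n = 0
    · simp [h, pvGoA_zero, revLow]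
    · rw [pvGoA_pos h]
      have hlt := Nat.div_lt_self (Nat.pos_of_ne_zero h) one_lt_two
      have hd : (if ((if n % 2 = 1 then '1' else '0') = '1') then 1 else 0) = n % 2 := by
        rcases Nat.mod_two_eq_zero_or_one n with h2 | h2 <;> simp [h2]
      simp only [List.reverse_append, List.reverse_singleton, List.singleton_append,
        List.foldl_cons, List.length_append, List.length_singleton]
      rw [hd, ih (n / 2) hlt, revLow]
      ring

theorem parse_trailing_zeros (k : Nat) : ∀ a : Nat,
    (List.replicate k '0').foldl (fun a c => a * 2 + (if c = '1' then 1 else 0)) a = a * 2 ^ k := by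
  induction k with
  | zero => intro a; simp
  | succ k ih =>
    intro a
    rw [List.replicate_succ, List.foldl_cons, ih]
    simp [Nat.pow_succ]; ring

theorem pvPad_eq : ∀ k : Nat, ∀ cs : List Char, k < 8 → (cs.length + k) % 8 = 0 →
    pvPad cs = List.replicate k '0' ++ cs := by
  intro k
  induction k with
  | zero =>
    intro cs _ h0
    rw [pvPad]; simp at h0 ⊢; omega
  | succ k ih =>
    intro cs hk h0
    have hne : cs.length % 8 ≠ 0 := by omega
    rw [pvPad, if_pos hne]
    have := ih ('0' :: cs) (by omega) (by simp; omega)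
    rw [this, List.replicate_succ']
    simp

def pvIter : Nat → Int × Int → Int × Int
  | 0, s => s
  | k+1, s => pvIter k (pvStep s)

theorem foldl_ignore : ∀ (l : List Int) (s : Int × Int),
    l.foldl (fun s _ => pvStep s) s = pvIter l.length s := by
  intro l
  induction l with
  | nil => intro s; rfl
  | cons x xs ih => intro s; simp [pvIter, ih]

theorem pvIter_val : ∀ (k : Nat) (r : Int) (m : Nat),
    pvIter k (r, (m : Int)) = (r * 2 ^ k + (revLow k m : Int), ((m / 2 ^ k : Nat) : Int)) := by
  intro k
  induction k with
  | zero => intro r m; simp [pvIter, revLow]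
  | succ k ih =>
    intro r m
    have hmod : PySem.Int.mod (m : Int) 2 = ((m % 2 : Nat) : Int) := by
      exact_mod_cast PySem.Int.mod_natCast m 2
    have hdiv : PySem.Int.floordiv (m : Int) 2 = ((m / 2 : Nat) : Int) := by
      exact_mod_cast PySem.Int.floordiv_natCast m 2
    show pvIter k (pvStep (r, (m : Int))) = _
    rw [pvStep]
    simp only [hmod, hdiv]
    rw [ih (r * 2 + ((m % 2 : Nat) : Int)) (m / 2)]
    simp only [Prod.mk.injEq]
    constructor
    · rw [revLow]
      push_cast
      ring
    · rw [Nat.div_div_eq_div_mul]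
      norm_num [Nat.pow_succ]
      ring_nf

-- combined facts about '{0:b}'.format(↑n) for n : Nat
theorem format_facts (n : Nat) :
    (pvFormatB (n : Int)).length = max (PySem.Int.bitLength (n : Int)) 1 ∧
    pvParse2 (pvFormatB (n : Int)).reverse = revLow (max (PySem.Int.bitLength (n : Int)) 1) n ∧
    n < 2 ^ (max (PySem.Int.bitLength (n : Int)) 1) := by
  by_cases h : n = 0
  · subst h
    refine ⟨by simp [pvFormatB], ?_, by simp⟩
    simp [pvFormatB, pvParse2, revLow_zero_arg]
  · have hfmt : pvFormatB (n : Int) = pvGoA n := by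
      simp [pvFormatB, h, Int.natAbs_natCast]
    have hlen := pvGoA_len n
    have hpos : 1 ≤ (pvGoA n).length := by
      rw [pvGoA_pos h]; simp
    have hmax : max (PySem.Int.bitLength (n : Int)) 1 = (pvGoA n).length := by omega
    refine ⟨by rw [hfmt, hmax], ?_, by rw [hmax]; exact pvGoA_lt n⟩
    rw [hfmt, hmax]
    have := parse_rev_go n 0
    simpa [pvParse2] using this

-- ===== VERDICT (by name: the statement is the Claim_ definition above) =====
theorem BinaryReversal_spec : Claim_equal_BinaryReversal := by
  intro s _ hpre
  unfold Spec_BinaryReversal BinaryReversal BinaryReversal_alt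
  obtain ⟨hsome, hge⟩ := hpre
  obtain ⟨n0, hn0⟩ := Option.isSome_iff_exists.mp hsome
  rw [hn0]
  rw [hn0] at hge
  dsimp only
  simp only [Option.getD_some] at hge
  obtain ⟨n, rfl⟩ : ∃ m : Nat, n0 = (m : Int) := ⟨n0.toNat, (Int.toNat_of_nonneg hge).symm⟩
  obtain ⟨hflen, hfparse, hflt⟩ := format_facts n
  set len := max (PySem.Int.bitLength (n : Int)) 1 with hlen
  set k := (8 - len % 8) % 8 with hkdef
  have hpad := pvPad_eq k (pvFormatB (n : Int)) (by omega) (by omega)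
  -- A side
  have hA : pvParse2 ((pvPad (pvFormatB (n : Int))).reverse) = revLow (len + k) n := by
    rw [hpad, List.reverse_append, List.reverse_replicate]
    unfold pvParse2
    rw [List.foldl_append]
    have h1 : (pvFormatB (n:Int)).reverse.foldl
        (fun a c => a * 2 + (if c = '1' then 1 else 0)) 0 = revLow len n := hfparse
    rw [h1, parse_trailing_zeros, revLow_ext len k n hflt]
  -- B side
  have hL : (len + 7) / 8 * 8 = len + k := by omega
  rw [hL]
  have hlenrange : (PySem.List.pyRange 0 ((len + k : Nat) : Int) 1).length = len + k := by
    rw [PySem.List.length_pyRange_one]; omega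
  rw [foldl_ignore, hlenrange, pvIter_val (len + k) 0 n]
  simp [hA]
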